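-- pv_equiv track=rewrite | github.com/ska1walker/insilo | backend/app/exports/markdown.py | _looks_like_task_list
-- ===== SOURCE A (Python) =====
-- from typing import Any
--
-- _TASK_OBJECT_KEYS = {"beschluss", "aufgabe", "task", "naechster_schritt", "schritt"}
--
-- _ASSIGNEE_KEYS = ("verantwortlich", "owner", "person", "wer")
--
-- _DUE_KEYS = ("frist", "deadline", "bis", "due")
--
-- def _looks_like_task_list(items: list[Any]) -> bool:
--     """A list of dicts where the dicts carry task-like fields."""
--     if not items:
--         return False
--     if not all(isinstance(it, dict) for it in items):
--         return False
--     keys: set[str] = set()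
--     for it in items:
--         keys.update(it.keys())
--     return bool(
--         keys & _TASK_OBJECT_KEYS
--         or any(k in keys for k in _ASSIGNEE_KEYS)
--         or any(k in keys for k in _DUE_KEYS)
--     )
-- ===== SOURCE B (Python) =====
-- # B: one recursive pass with a 'found' accumulator; per item, probe the 13 known
-- # key names by dict membership (no set objects, no gathered key union).
-- _TASK_OBJECT_KEYS = {"beschluss", "aufgabe", "task", "naechster_schritt", "schritt"}
-- _ASSIGNEE_KEYS = ("verantwortlich", "owner", "person", "wer")
-- _DUE_KEYS = ("frist", "deadline", "bis", "due")
--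
-- _ALL_KEYS = ("beschluss", "aufgabe", "task", "naechster_schritt", "schritt") + _ASSIGNEE_KEYS + _DUE_KEYS
--
-- def _looks_like_task_list(items):
--     def go(rest, found):
--         if not rest:
--             return found
--         it = rest[0]
--         if not isinstance(it, dict):
--             return False
--         return go(rest[1:], found or any(k in it for k in _ALL_KEYS))
--     return go(items, False)
-- ===== Notes on version B (the rewrite author's own statement) =====
-- stated objective: alternative
-- what changed: A stages the work: guard that all items are dicts, gather the union of every item's keys into a set, then run three separate intersection/membership tests; B makes a single recursive pass with a 'found' accumulator that interleaves the dict check with probing each item for the 13 known key names by direct dict membership, never building any key set.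
import Mathlib
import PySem

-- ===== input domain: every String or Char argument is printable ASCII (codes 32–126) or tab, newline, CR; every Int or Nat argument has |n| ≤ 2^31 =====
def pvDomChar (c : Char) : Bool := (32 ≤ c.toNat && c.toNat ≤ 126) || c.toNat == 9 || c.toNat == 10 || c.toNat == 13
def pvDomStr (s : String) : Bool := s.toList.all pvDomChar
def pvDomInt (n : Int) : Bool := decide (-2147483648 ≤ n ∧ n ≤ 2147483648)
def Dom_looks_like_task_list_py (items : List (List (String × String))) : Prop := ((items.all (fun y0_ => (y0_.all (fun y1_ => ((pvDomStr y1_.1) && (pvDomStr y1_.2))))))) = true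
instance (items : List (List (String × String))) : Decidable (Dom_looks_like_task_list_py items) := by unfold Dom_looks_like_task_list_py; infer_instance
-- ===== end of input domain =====

-- B replaces A's staged gather-all-keys-then-three-set-checks by one recursive pass with a
-- 'found' accumulator probing each item for the 13 known key names (objective: alternative);
-- the return values agree on every input.


-- ===== PORT A =====
def pvTaskObjectKeys : PySem.Set String :=
  PySem.Set.ofList ["beschluss", "aufgabe", "task", "naechster_schritt", "schritt"]
def pvAssigneeKeys : List String := ["verantwortlich", "owner", "person", "wer"]
def pvDueKeys : List String := ["frist", "deadline", "bis", "due"]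

def looks_like_task_list_py (items : List (List (String × String))) : Bool :=
  if items.isEmpty then false
  else if !(items.all (fun _ => true)) then false  -- `all(isinstance(it, dict) ...)`: always true under this typing
  else
    -- keys = set(); for it in items: keys.update(it.keys())
    let keys : PySem.Set String :=
      items.foldl (fun ks it => PySem.Set.update ks (it.map Prod.fst)) PySem.Set.empty
    !(PySem.Set.inter keys pvTaskObjectKeys).isEmpty
      || pvAssigneeKeys.any (fun k => PySem.Set.contains keys k)
      || pvDueKeys.any (fun k => PySem.Set.contains keys k)

-- ===== PORT B =====
def pvAllKeys : List String :=
  ["beschluss", "aufgabe", "task", "naechster_schritt", "schritt",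
   "verantwortlich", "owner", "person", "wer",
   "frist", "deadline", "bis", "due"]

-- inner recursive helper `go(rest, found)` of Source B
def pvGo (rest : List (List (String × String))) (found : Bool) : Bool :=
  match rest with
  | [] => found
  | it :: rest' =>
      -- `if not isinstance(it, dict): return False` is vacuous under this typing
      pvGo rest' (found || pvAllKeys.any (fun k => PySem.Dict.contains (PySem.Dict.mk it) k))

def looks_like_task_list_py_alt (items : List (List (String × String))) : Bool :=
  pvGo items false

-- ===== PRECONDITION & SPEC =====
def Spec_looks_like_task_list_py (items : List (List (String × String))) (out : Bool) : Prop := out = looks_like_task_list_py_alt items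
instance (items : List (List (String × String))) (out : Bool) : Decidable (Spec_looks_like_task_list_py items out) := by unfold Spec_looks_like_task_list_py; infer_instance

-- ===== CLAIM (what is proved, stated in full; the proofs are below) =====
def Claim_equal_looks_like_task_list_py : Prop := ∀ (items : List (List (String × String))), Dom_looks_like_task_list_py items → Spec_looks_like_task_list_py items (looks_like_task_list_py items)

-- ===== LEMMAS AND PROOFS =====

-- membership in A's accumulated key set = some item carries the key
theorem mem_foldl_update {s : PySem.Set String} {items : List (List (String × String))} {y : String} :
    y ∈ items.foldl (fun ks it => PySem.Set.update ks (it.map Prod.fst)) s ↔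
      y ∈ s ∨ ∃ it ∈ items, y ∈ it.map Prod.fst := by
  induction items generalizing s with
  | nil => simp
  | cons it rest ih =>
    simp only [List.foldl_cons, ih, PySem.Set.mem_update, List.mem_cons]
    constructor
    · rintro ((h | h) | ⟨i, hi, hy⟩)
      · exact Or.inl h
      · exact Or.inr ⟨it, Or.inl rfl, h⟩
      · exact Or.inr ⟨i, Or.inr hi, hy⟩
    · rintro (h | ⟨i, (rfl | hi), hy⟩)
      · exact Or.inl (Or.inl h)
      · exact Or.inl (Or.inr hy)
      · exact Or.inr ⟨i, hi, hy⟩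

-- B's recursion = accumulator OR one hit among the items
theorem pvGo_eq (rest : List (List (String × String))) (found : Bool) :
    pvGo rest found =
      (found || rest.any (fun it => pvAllKeys.any (fun k => PySem.Dict.contains (PySem.Dict.mk it) k))) := by
  induction rest generalizing found with
  | nil => simp [pvGo]
  | cons it rest' ih =>
    simp only [pvGo, ih, List.any_cons]
    cases found <;> simp

-- both programs decide the same proposition: some item has a key among the 13 task-like keys
theorem ports_agree (items : List (List (String × String))) :
    looks_like_task_list_py items = looks_like_task_list_py_alt items := by
  have h1 : (items.all fun _ => true) = true := List.all_eq_true.mpr fun _ _ => rfl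
  unfold looks_like_task_list_py looks_like_task_list_py_alt
  rw [h1, pvGo_eq]
  simp only [Bool.not_true, Bool.false_eq_true, if_false, Bool.false_or]
  by_cases hne : items = []
  · subst hne; decide
  · simp only [List.isEmpty_iff, hne, if_false]
    rw [Bool.eq_iff_iff]
    simp only [Bool.or_eq_true, Bool.not_eq_eq_eq_not, Bool.not_true,
      List.isEmpty_eq_false_iff_exists_mem, List.any_eq_true, PySem.Set.contains_iff,
      PySem.Set.mem_inter, mem_foldl_update, PySem.Set.empty, List.not_mem_nil, false_or,
      pvTaskObjectKeys, PySem.Set.mem_ofList, PySem.Dict.contains_iff_mem_keys]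
    have hk : ∀ it : List (String × String), (PySem.Dict.mk it).keys = it.map Prod.fst := by
      intro it; simp [PySem.Dict.keys]
    have hall : ∀ y : String, y ∈ pvAllKeys ↔
        (y ∈ (["beschluss", "aufgabe", "task", "naechster_schritt", "schritt"] : List String)
          ∨ y ∈ pvAssigneeKeys ∨ y ∈ pvDueKeys) := by
      intro y
      simp only [pvAllKeys, pvAssigneeKeys, pvDueKeys, List.mem_cons, List.not_mem_nil, or_false]
      tauto
    simp only [hk, hall]
    constructor
    · rintro ((⟨y, ⟨it, hit, hmem⟩, hy⟩ | ⟨k, hk', it, hit, hmem⟩) | ⟨k, hk', it, hit, hmem⟩)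
      · exact ⟨it, hit, y, Or.inl hy, hmem⟩
      · exact ⟨it, hit, k, Or.inr (Or.inl hk'), hmem⟩
      · exact ⟨it, hit, k, Or.inr (Or.inr hk'), hmem⟩
    · rintro ⟨it, hit, k, (hk' | hk' | hk'), hkIt⟩
      · exact Or.inl (Or.inl ⟨k, ⟨it, hit, hkIt⟩, hk'⟩)
      · exact Or.inl (Or.inr ⟨k, hk', it, hit, hkIt⟩)
      · exact Or.inr ⟨k, hk', it, hit, hkIt⟩

-- ===== VERDICT (by name: the statement is the Claim_ definition above) =====
theorem looks_like_task_list_py_spec : Claim_equal_looks_like_task_list_py := by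
  intro items _
  unfold Spec_looks_like_task_list_py
  exact ports_agree items
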